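-- pv_equiv track=rewrite | github.com/thiagorigstak/Solved-Problemsets | contest9/D.py | calc_total_rep
-- ===== SOURCE A (Python) =====
-- import math
--
-- def fact(n):
--     return math.factorial(n)
--
-- def calc_total_rep(partition):
--     n = 1
--     d = {}
--     for i in partition:
--         if i not in d.keys():
--             d[i] = 1
--         else:
--             d[i] += 1
--
--     for i in d.keys():
--         n *= fact(d[i])
--     return n
-- ===== SOURCE B (Python) =====
-- import math
--
-- def calc_total_rep(partition):
--     total = 1
--     run = 0
--     prev = None
--     for x in sorted(partition):
--         if run > 0 and x == prev:
--             run += 1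
--         else:
--             total *= math.factorial(run)
--             run = 1
--             prev = x
--     return total * math.factorial(run)
-- ===== Notes on version B (the rewrite author's own statement) =====
-- stated objective: alternative
-- what changed: B sorts the partition and multiplies factorials of consecutive run lengths in one pass, instead of A's hash-dict multiplicity counting followed by a product over the dict's keys.
import Mathlib
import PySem

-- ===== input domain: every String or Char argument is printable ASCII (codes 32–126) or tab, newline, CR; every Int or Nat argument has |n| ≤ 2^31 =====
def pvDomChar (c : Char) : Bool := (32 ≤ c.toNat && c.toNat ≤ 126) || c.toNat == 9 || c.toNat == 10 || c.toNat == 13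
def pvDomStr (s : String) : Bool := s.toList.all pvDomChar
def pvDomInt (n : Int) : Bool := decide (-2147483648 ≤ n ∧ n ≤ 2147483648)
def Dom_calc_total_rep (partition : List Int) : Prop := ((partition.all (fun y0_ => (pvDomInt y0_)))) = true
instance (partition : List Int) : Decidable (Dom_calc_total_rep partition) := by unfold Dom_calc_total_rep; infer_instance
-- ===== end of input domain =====

-- B replaces A's dict-based multiplicity counting by a sort-then-run-length pass (alternative algorithm, same cost class).


-- ===== PORT A =====
-- math.factorial (exact here: both programs only apply it to nonnegative counts)
def pvFact (n : Int) : Int := (Nat.factorial n.toNat : Int)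

def calc_total_rep (partition : List Int) : Int :=
  let d := partition.foldl
    (fun d i => if i ∈ d.keys then d.insert i (d.getD i 0 + 1) else d.insert i 1)
    (PySem.Dict.empty : PySem.Dict Int Int)
  d.keys.foldl (fun n i => n * pvFact (d.getD i 0)) 1

-- ===== PORT B =====
-- the body of Source B's for-loop (one step of the run-length pass)
def pvStepB (st : Int × Int × Option Int) (x : Int) : Int × Int × Option Int :=
  if 0 < st.2.1 ∧ st.2.2 = some x then (st.1, st.2.1 + 1, st.2.2)
  else (st.1 * pvFact st.2.1, 1, some x)

def calc_total_rep_alt (partition : List Int) : Int :=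
  let st := (PySem.List.sorted partition (fun v => v) false).foldl pvStepB (1, 0, none)
  st.1 * pvFact st.2.1

-- ===== PRECONDITION & SPEC =====
def Spec_calc_total_rep (partition : List Int) (out : Int) : Prop := out = calc_total_rep_alt partition
instance (partition : List Int) (out : Int) : Decidable (Spec_calc_total_rep partition out) := by unfold Spec_calc_total_rep; infer_instance

-- ===== CLAIM (what is proved, stated in full; the proofs are below) =====
def Claim_equal_calc_total_rep : Prop := ∀ (partition : List Int), Dom_calc_total_rep partition → Spec_calc_total_rep partition (calc_total_rep partition)

-- ===== LEMMAS AND PROOFS =====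

-- A's counting step equals the canonical counter step
lemma pv_stepA_eq :
    (fun (d : PySem.Dict Int Int) i => if i ∈ d.keys then d.insert i (d.getD i 0 + 1) else d.insert i 1)
      = fun (d : PySem.Dict Int Int) i => d.insert i (d.getD i 0 + 1) := by
  funext d i
  by_cases h : i ∈ d.keys
  · simp [h]
  · have hc : d.contains i = false := by
      cases h' : d.contains i
      · rfl
      · exact absurd ((PySem.Dict.contains_iff_mem_keys d i).mp h') h
    simp [h, PySem.Dict.getD_of_not_contains d (0 : Int) hc]

lemma pv_foldl_mul (l : List Int) (f : Int → Int) (a : Int) :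
    l.foldl (fun n k => n * f k) a = a * (l.map f).prod := by
  induction l generalizing a with
  | nil => simp
  | cons x t ih => simp [List.foldl_cons, ih, mul_assoc]

lemma pv_prod_toFinset_eq (l : List Int) (f : Int → Int) (h : l.Nodup) :
    (l.map f).prod = ∏ k ∈ l.toFinset, f k := by
  induction l with
  | nil => simp
  | cons x t ih =>
    rcases List.nodup_cons.mp h with ⟨hx, ht⟩
    rw [List.map_cons, List.prod_cons, List.toFinset_cons,
      Finset.prod_insert (by simpa using hx), ih ht]

-- A computes the product over the distinct elements of fact(count)
lemma pv_A_char (p : List Int) :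
    calc_total_rep p = ∏ k ∈ p.toFinset, pvFact ((p.count k : Int)) := by
  unfold calc_total_rep
  rw [pv_stepA_eq]
  have hkeys : (p.foldl (fun d i => d.insert i (d.getD i 0 + 1))
      (PySem.Dict.empty : PySem.Dict Int Int)).keys = PySem.Set.ofList p := by
    rw [PySem.Dict.keys_foldl_insert]
    simp [PySem.Set.update_nil_left]
  have hgetD : ∀ v, (p.foldl (fun d i => d.insert i (d.getD i 0 + 1))
      (PySem.Dict.empty : PySem.Dict Int Int)).getD v 0 = (p.count v : Int) := by
    intro v
    rw [PySem.Dict.getD_foldl_insert_add_one]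
    simp
  simp only [hkeys, hgetD]
  rw [pv_foldl_mul, one_mul,
    pv_prod_toFinset_eq _ _ (PySem.Set.nodup_ofList p)]
  apply Finset.prod_congr
  · ext k; simp [PySem.Set.mem_ofList]
  · intro k _; rfl

-- peel the head's factor off the finset product
lemma pv_peel (x : Int) (t : List Int) :
    ∏ k ∈ (x :: t).toFinset, pvFact (((x :: t).count k : Int))
      = pvFact ((t.count x : Int) + 1)
        * ∏ k ∈ (t.filter (· ≠ x)).toFinset, pvFact ((t.count k : Int)) := by
  rw [List.toFinset_cons,
    ← Finset.mul_prod_erase _ _ (Finset.mem_insert_self x t.toFinset),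
    Finset.erase_insert_eq_erase]
  congr 1
  · simp [List.count_cons_self]
  · have hfin : t.toFinset.erase x = (t.filter (· ≠ x)).toFinset := by
      ext k; simp [and_comm]
    rw [← hfin]
    apply Finset.prod_congr rfl
    intro k hk
    have hkx : k ≠ x := (Finset.mem_erase.mp hk).1
    simp [Ne.symm hkx]

-- main invariant of B's run-length pass over a sorted tail
lemma pv_B_main : ∀ (s : List Int), s.Pairwise (· ≤ ·) →
    ∀ (T r x : Int), 0 < r → (∀ y ∈ s, x ≤ y) →
    (s.foldl pvStepB (T, r, some x)).1 * pvFact (s.foldl pvStepB (T, r, some x)).2.1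
      = T * pvFact (r + (s.count x : Int))
        * ∏ k ∈ (s.filter (· ≠ x)).toFinset, pvFact ((s.count k : Int)) := by
  intro s
  induction s with
  | nil => intro _ T r x hr _; simp
  | cons y t ih =>
    intro hs T r x hr hle
    rcases List.pairwise_cons.mp hs with ⟨hyt, ht⟩
    by_cases hxy : y = x
    · subst hxy
      rw [List.foldl_cons, show pvStepB (T, r, some y) y = (T, r + 1, some y) by
        simp [pvStepB, hr]]
      rw [ih ht T (r + 1) y (by omega) hyt]
      have hfil : (y :: t).filter (· ≠ y) = t.filter (· ≠ y) := by simp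
      have hprod : ∏ k ∈ (t.filter (· ≠ y)).toFinset, pvFact (((y :: t).count k : Int))
          = ∏ k ∈ (t.filter (· ≠ y)).toFinset, pvFact ((t.count k : Int)) := by
        apply Finset.prod_congr rfl
        intro k hk
        have hky : k ≠ y := by
          simpa using (List.mem_filter.mp (List.mem_toFinset.mp hk)).2
        simp [Ne.symm hky]
      rw [hfil, hprod, List.count_cons_self]
      push_cast
      ring_nf
    · have hxny : x ≠ y := fun h => hxy h.symm
      have hxnt : x ∉ y :: t := by
        intro hmem
        rcases List.mem_cons.mp hmem with h | h
        · exact hxny h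
        · exact hxy (le_antisymm (hyt x h) (hle y List.mem_cons_self))
      rw [List.foldl_cons, show pvStepB (T, r, some x) y = (T * pvFact r, 1, some y) by
        simp [pvStepB, fun h : x = y => hxny h]]
      rw [ih ht (T * pvFact r) 1 y (by omega) hyt]
      have hcx : (y :: t).count x = 0 := List.count_eq_zero.mpr hxnt
      have hfil : (y :: t).filter (· ≠ x) = y :: t := by
        apply List.filter_eq_self.mpr
        intro a ha
        simpa using fun h : a = x => hxnt (h ▸ ha)
      rw [hcx, hfil, pv_peel y t]
      push_cast
      ring_nf

-- B computes the same product over the distinct elements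
lemma pv_B_char (p : List Int) :
    calc_total_rep_alt p = ∏ k ∈ p.toFinset, pvFact ((p.count k : Int)) := by
  unfold calc_total_rep_alt
  cases hs : PySem.List.sorted p (fun v => v) false with
  | nil =>
    have hp : p = [] := (PySem.List.sorted_eq_nil_iff p (fun v => v) false).mp hs
    subst hp
    simp [pvFact]
  | cons x t =>
    have hperm : (x :: t).Perm p := hs ▸ PySem.List.sorted_perm p (fun v => v) false
    have hpair : (x :: t).Pairwise (· ≤ ·) := by
      have := PySem.List.sorted_pairwise p (fun v => v)
      rw [hs] at this
      exact this
    rcases List.pairwise_cons.mp hpair with ⟨hxt, ht⟩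
    show (List.foldl pvStepB (1, 0, none) (x :: t)).1
        * pvFact (List.foldl pvStepB (1, 0, none) (x :: t)).2.1 = _
    rw [List.foldl_cons, show pvStepB (1, 0, none) x = (1 * pvFact 0, 1, some x) by
      simp [pvStepB]]
    have h0 : ((1 : Int) * pvFact 0, (1 : Int), some x) = ((1 : Int), (1 : Int), some x) := by
      simp [pvFact]
    rw [h0, pv_B_main t ht 1 1 x (by omega) hxt]
    have hcnt : ∀ k, p.count k = (x :: t).count k := fun k => (hperm.count_eq k).symm
    have hfin : p.toFinset = (x :: t).toFinset := by
      ext k; simp [← hperm.mem_iff]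
    simp only [hfin, hcnt, pv_peel x t]
    ring_nf

-- ===== VERDICT (by name: the statement is the Claim_ definition above) =====
theorem calc_total_rep_spec : Claim_equal_calc_total_rep := by
  intro p _
  unfold Spec_calc_total_rep
  rw [pv_A_char, pv_B_char]
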